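-- pv_equiv track=rewrite | github.com/ServiceNow/PipelineRL | tests/server_weight_update_utils.py | _identify_stable_texts
-- ===== SOURCE A (Python) =====
-- def _identify_stable_texts(phases, min_stable_gens=5):
--     """Return (text_a, text_b) identified from the first two stable phases.
--
--     Iterates phases in order, skipping any with fewer than ``min_stable_gens``
--     generations (transition artifacts).  The first stable phase gives text_A;
--     the first stable phase with a different text gives text_B.
--
--     Returns (text_a, text_b) or (None, None) if two distinct stable texts
--     cannot be found.
--     """
--     text_a = None
--     text_b = None
--     for text, items in phases:
--         if len(items) < min_stable_gens:
--             continue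
--         if text_a is None:
--             text_a = text
--         elif text != text_a:
--             text_b = text
--             break
--     if text_a is None or text_b is None:
--         return None, None
--     return text_a, text_b
-- ===== SOURCE B (Python) =====
-- def _identify_stable_texts(phases, min_stable_gens=5):
--     # Two passes: filter stable texts, then order-preserving dedupe; take first two.
--     stable = [text for text, items in phases if len(items) >= min_stable_gens]
--     distinct = []
--     for t in stable:
--         if t not in distinct:
--             distinct.append(t)
--     if len(distinct) < 2:
--         return None, None
--     return distinct[0], distinct[1]
-- ===== Notes on version B (the rewrite author's own statement) =====
-- stated objective: alternative
-- what changed: Replaces A's single scan with two scalar flags and an early break by a two-pass pipeline: filter the stable texts, dedupe them preserving order, then take the first two distinct texts.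
import Mathlib
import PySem

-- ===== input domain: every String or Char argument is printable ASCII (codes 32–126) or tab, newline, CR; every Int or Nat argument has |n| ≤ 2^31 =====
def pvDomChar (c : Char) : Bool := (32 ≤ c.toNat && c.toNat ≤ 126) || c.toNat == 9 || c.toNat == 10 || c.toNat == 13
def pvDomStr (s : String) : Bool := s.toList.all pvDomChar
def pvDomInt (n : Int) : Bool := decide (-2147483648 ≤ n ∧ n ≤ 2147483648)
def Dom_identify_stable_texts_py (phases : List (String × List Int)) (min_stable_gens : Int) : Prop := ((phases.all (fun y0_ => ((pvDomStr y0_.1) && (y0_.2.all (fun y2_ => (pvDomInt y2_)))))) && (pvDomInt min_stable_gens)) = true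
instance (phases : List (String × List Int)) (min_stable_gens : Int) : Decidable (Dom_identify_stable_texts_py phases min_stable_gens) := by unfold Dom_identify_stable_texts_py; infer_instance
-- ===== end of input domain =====

-- B replaces A's one scan with two flags and an early break by a filter pass + ordered dedupe pass; return value only, no speed claim.

-- ===== PORT A =====
-- A's loop: state text_a (text_b materialises only at the break, which ends the loop)
def pvGoA : List (String × List Int) → Int → Option String → Option String × Option String
  | [], _, ta => (ta, none)
  | (text, items) :: rest, m, ta =>
    if (items.length : Int) < m then pvGoA rest m ta
    else
      match ta with
      | none => pvGoA rest m (some text)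
      | some a => if text = a then pvGoA rest m (some a) else (some a, some text)

def identify_stable_texts_py (phases : List (String × List Int)) (min_stable_gens : Int) : Option String × Option String :=
  match pvGoA phases min_stable_gens none with
  | (some a, some b) => (some a, some b)  -- return text_a, text_b
  | _ => (none, none)                     -- text_a is None or text_b is None

-- ===== PORT B =====
-- order-preserving dedupe (B's second pass)
def pvDistinct : List String → List String → List String
  | [], acc => acc
  | t :: rest, acc => if t ∈ acc then pvDistinct rest acc else pvDistinct rest (acc ++ [t])

-- "if len(distinct) < 2: return None, None; return distinct[0], distinct[1]"
def pvTake2 : List String → Option String × Option String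
  | a :: b :: _ => (some a, some b)
  | _ => (none, none)

def identify_stable_texts_py_alt (phases : List (String × List Int)) (min_stable_gens : Int) : Option String × Option String :=
  let stable := (phases.filter (fun p => min_stable_gens ≤ (p.2.length : Int))).map Prod.fst
  pvTake2 (pvDistinct stable [])

-- ===== PRECONDITION & SPEC =====
def Spec_identify_stable_texts_py (phases : List (String × List Int)) (min_stable_gens : Int) (out : Option String × Option String) : Prop := out = identify_stable_texts_py_alt phases min_stable_gens
instance (phases : List (String × List Int)) (min_stable_gens : Int) (out : Option String × Option String) : Decidable (Spec_identify_stable_texts_py phases min_stable_gens out) := by unfold Spec_identify_stable_texts_py; infer_instance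

-- ===== CLAIM (what is proved, stated in full; the proofs are below) =====
def Claim_equal_identify_stable_texts_py : Prop := ∀ (phases : List (String × List Int)) (min_stable_gens : Int), Dom_identify_stable_texts_py phases min_stable_gens → Spec_identify_stable_texts_py phases min_stable_gens (identify_stable_texts_py phases min_stable_gens)

-- ===== LEMMAS AND PROOFS =====

-- A's loop over stable texts only, as a function of the filtered text list
def pvH : List String → Option String → Option String × Option String
  | [], ta => (ta, none)
  | t :: rest, none => pvH rest (some t)
  | t :: rest, some a => if t = a then pvH rest (some a) else (some a, some t)

def pvFin : Option String × Option String → Option String × Option String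
  | (some a, some b) => (some a, some b)
  | _ => (none, none)

theorem pvGoA_eq_pvH (phases : List (String × List Int)) (m : Int) (ta : Option String) :
    pvGoA phases m ta = pvH ((phases.filter (fun p => m ≤ (p.2.length : Int))).map Prod.fst) ta := by
  induction phases generalizing ta with
  | nil => rfl
  | cons p rest ih =>
    obtain ⟨text, items⟩ := p
    by_cases h : (items.length : Int) < m
    · have h' : ¬ m ≤ (items.length : Int) := by omega
      simp [pvGoA, h, h', ih]
    · have h' : m ≤ (items.length : Int) := by omega
      cases ta with
      | none => simp [pvGoA, h, h', pvH, ih]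
      | some a =>
        by_cases ht : text = a
        · simp [pvGoA, h, h', pvH, ht, ih]
        · simp [pvGoA, h, h', pvH, ht]

theorem pvDistinct_prefix (ts acc : List String) : ∃ s, pvDistinct ts acc = acc ++ s := by
  induction ts generalizing acc with
  | nil => exact ⟨[], by simp [pvDistinct]⟩
  | cons t rest ih =>
    by_cases h : t ∈ acc
    · simpa [pvDistinct, h] using ih acc
    · obtain ⟨s, hs⟩ := ih (acc ++ [t])
      exact ⟨t :: s, by simp [pvDistinct, h, hs]⟩

theorem pvH_some (ts : List String) (a : String) :
    pvFin (pvH ts (some a)) = pvTake2 (pvDistinct ts [a]) := by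
  induction ts with
  | nil => rfl
  | cons t rest ih =>
    by_cases ht : t = a
    · simp [pvH, pvDistinct, ht, ih]
    · obtain ⟨s, hs⟩ := pvDistinct_prefix rest [a, t]
      have hmem : t ∉ ([a] : List String) := by simpa using ht
      simp [pvH, pvDistinct, ht, hmem, hs, pvFin, pvTake2]

-- ===== VERDICT (by name: the statement is the Claim_ definition above) =====
theorem identify_stable_texts_py_spec : Claim_equal_identify_stable_texts_py := by
  intro phases m _
  unfold Spec_identify_stable_texts_py identify_stable_texts_py identify_stable_texts_py_alt
  have hA : (match pvGoA phases m none with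
      | (some a, some b) => (some a, some b)
      | _ => ((none : Option String), (none : Option String))) = pvFin (pvGoA phases m none) := by
    rcases pvGoA phases m none with ⟨(_|a), (_|b)⟩ <;> rfl
  rw [hA, pvGoA_eq_pvH]
  cases hs : (phases.filter (fun p => m ≤ (p.2.length : Int))).map Prod.fst with
  | nil => rfl
  | cons t ts =>
    have : pvDistinct (t :: ts) [] = pvDistinct ts [t] := by simp [pvDistinct]
    simp [pvH, this, pvH_some ts t]
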